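-- pv_equiv track=rewrite | github.com/pypi-data/pypi-mirror-389 | packages/runexp/runexp-0.1.4-py3-none-any.whl/runexp/parser_utils.py | remove_runexp_args
-- ===== SOURCE A (Python) =====
-- import enum
--
-- class Options(enum.Enum):
--     "some reserved prefix"
--
--     SLURM = "runexp-slurm"
--     NO_DRY = "runexp-no-dry-run"
--     SLURM_ARG = "runexp-slurm-verbatim"
--     TEMPLATE_SLURM = "runexp-slurm-template"
--     MAX_CONCURRENT_SWEEP = "runexp-max-concurrent-sweep"
--     JOB_OUT_DIR = "runexp-job-out-dir"
--
--     @property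
--     def arg(self) -> str:
--         "formatted as --option"
--         return "--" + self.value
--
--     @property
--     def dest(self) -> str:
--         "key in the namespace"
--         return self.value.replace("-", "_")
--
--     @staticmethod
--     def all_dest_prefixes():
--         return [p.dest for p in Options]
--
-- def remove_runexp_args(args: list[str]) -> list[str]:
--     "return a copy of args without runexp general arguments"
--
--     bad_indices: list[int] = []
--     for idx, arg in enumerate(args):
--         if not arg.startswith("--"):
--             continue
--
--         # key-value options
--         if arg in [
--             Options.SLURM_ARG.arg,
--             Options.TEMPLATE_SLURM.arg,
--             Options.MAX_CONCURRENT_SWEEP.arg,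
--             Options.JOB_OUT_DIR.arg,
--         ]:
--             bad_indices += [idx, idx + 1]
--
--         # flag options
--         if arg in [Options.SLURM.arg, Options.NO_DRY.arg]:
--             bad_indices += [idx]
--
--     return [a for i, a in enumerate(args) if i not in bad_indices]
-- ===== SOURCE B (Python) =====
-- _KV_ARGS = frozenset({
--     "--runexp-slurm-verbatim",
--     "--runexp-slurm-template",
--     "--runexp-max-concurrent-sweep",
--     "--runexp-job-out-dir",
-- })
-- _FLAG_ARGS = frozenset({"--runexp-slurm", "--runexp-no-dry-run"})
--
-- def remove_runexp_args(args: list[str]) -> list[str]: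
--     "return a copy of args without runexp general arguments"
--     result = []
--     prev_was_kv = False
--     for arg in args:
--         if not (prev_was_kv or arg in _KV_ARGS or arg in _FLAG_ARGS):
--             result.append(arg)
--         prev_was_kv = arg in _KV_ARGS
--     return result
-- ===== Notes on version B (the rewrite author's own statement) =====
-- stated objective: simpler
-- what changed: Replaces A's two-phase scheme (build a list of bad indices over enumerate, then filter the enumerated list by index membership) with a single pass over the args that carries one boolean flag (previous arg was a key-value option) and appends kept args directly.
import Mathlib
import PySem

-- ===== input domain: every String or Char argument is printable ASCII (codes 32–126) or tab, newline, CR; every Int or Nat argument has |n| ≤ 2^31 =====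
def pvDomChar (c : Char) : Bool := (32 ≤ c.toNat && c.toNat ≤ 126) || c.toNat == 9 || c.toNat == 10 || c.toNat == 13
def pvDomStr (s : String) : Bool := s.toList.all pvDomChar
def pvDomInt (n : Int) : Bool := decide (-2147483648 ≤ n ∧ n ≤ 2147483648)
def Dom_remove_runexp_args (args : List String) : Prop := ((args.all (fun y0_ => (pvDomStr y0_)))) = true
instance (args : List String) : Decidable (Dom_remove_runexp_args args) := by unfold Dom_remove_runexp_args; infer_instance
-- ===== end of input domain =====

-- B is a simpler single pass carrying one boolean (previous arg was a key-value option)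
-- instead of A's two-phase build-bad-index-list-then-filter; return value only, no mutation.

-- ===== PORT A =====
-- A builds a list of bad indices over enumerate(args), then filters by index membership.
def pvStepA (bad : List Int) (p : Int × String) : List Int :=
  if ¬ (PySem.Str.startswith p.2 "--") then bad
  else
    let bad1 := if p.2 ∈ ["--runexp-slurm-verbatim", "--runexp-slurm-template",
                          "--runexp-max-concurrent-sweep", "--runexp-job-out-dir"]
                then bad ++ [p.1, p.1 + 1] else bad
    if p.2 ∈ ["--runexp-slurm", "--runexp-no-dry-run"] then bad1 ++ [p.1] else bad1

def remove_runexp_args (args : List String) : List String :=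
  let bad := (PySem.List.enumerate args 0).foldl pvStepA []
  ((PySem.List.enumerate args 0).filter (fun p => decide (p.1 ∉ bad))).map (·.2)

-- ===== PORT B =====
def pvKvSet : PySem.Set String :=
  PySem.Set.ofList ["--runexp-slurm-verbatim", "--runexp-slurm-template",
                    "--runexp-max-concurrent-sweep", "--runexp-job-out-dir"]
def pvFlagSet : PySem.Set String :=
  PySem.Set.ofList ["--runexp-slurm", "--runexp-no-dry-run"]

def remove_runexp_args_alt (args : List String) : List String :=
  (args.foldl
    (fun (st : List String × Bool) arg =>
      (if ¬ (st.2 || PySem.Set.contains pvKvSet arg || PySem.Set.contains pvFlagSet arg)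
       then st.1 ++ [arg] else st.1,
       PySem.Set.contains pvKvSet arg))
    ([], false)).1

-- ===== PRECONDITION & SPEC =====
def Spec_remove_runexp_args (args : List String) (out : List String) : Prop := out = remove_runexp_args_alt args
instance (args : List String) (out : List String) : Decidable (Spec_remove_runexp_args args out) := by unfold Spec_remove_runexp_args; infer_instance

-- ===== CLAIM (what is proved, stated in full; the proofs are below) =====
def Claim_equal_remove_runexp_args : Prop := ∀ (args : List String), Dom_remove_runexp_args args → Spec_remove_runexp_args args (remove_runexp_args args)

-- ===== LEMMAS AND PROOFS =====

-- element classifiers (proof-side shorthands)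
def pvKvB (a : String) : Bool := PySem.Set.contains pvKvSet a
def pvFlagB (a : String) : Bool := PySem.Set.contains pvFlagSet a
def pvResv (a : String) : Bool := pvKvB a || pvFlagB a

-- the common one-pass specification both ports are reduced to
def pvGo : Bool → List String → List String
  | _, [] => []
  | prev, a :: rest => (if prev || pvResv a then [] else [a]) ++ pvGo (pvKvB a) rest

-- bad-index characterisation: badB args s i decides whether A marks absolute index i
def pvBadB : List String → Int → Int → Bool
  | [], _, _ => false
  | a :: rest, s, i =>
    ((i == s) && pvResv a) || ((i == s + 1) && pvKvB a) || pvBadB rest (s + 1) i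

theorem pvKv_startswith (a : String)
    (h : a ∈ ["--runexp-slurm-verbatim", "--runexp-slurm-template",
              "--runexp-max-concurrent-sweep", "--runexp-job-out-dir"]) :
    PySem.Str.startswith a "--" = true := by
  fin_cases h <;> decide

theorem pvFlag_startswith (a : String)
    (h : a ∈ ["--runexp-slurm", "--runexp-no-dry-run"]) :
    PySem.Str.startswith a "--" = true := by
  fin_cases h <;> decide

theorem pvKvB_iff (a : String) :
    pvKvB a = true ↔ a ∈ ["--runexp-slurm-verbatim", "--runexp-slurm-template",
                          "--runexp-max-concurrent-sweep", "--runexp-job-out-dir"] := by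
  rw [pvKvB, show pvKvSet = ["--runexp-slurm-verbatim", "--runexp-slurm-template",
      "--runexp-max-concurrent-sweep", "--runexp-job-out-dir"] from by decide,
    PySem.Set.contains]
  exact List.contains_iff_mem

theorem pvFlagB_iff (a : String) :
    pvFlagB a = true ↔ a ∈ ["--runexp-slurm", "--runexp-no-dry-run"] := by
  rw [pvFlagB, show pvFlagSet = ["--runexp-slurm", "--runexp-no-dry-run"] from by decide,
    PySem.Set.contains]
  exact List.contains_iff_mem

theorem pv_mem_stepA (bad : List Int) (s i : Int) (a : String) :
    (i ∈ pvStepA bad (s, a)) ↔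
      (i ∈ bad ∨ (pvKvB a = true ∧ (i = s ∨ i = s + 1)) ∨ (pvFlagB a = true ∧ i = s)) := by
  by_cases hkv : pvKvB a = true
  all_goals by_cases hfl : pvFlagB a = true
  all_goals
    first
    | (have hsw := pvKv_startswith a ((pvKvB_iff a).1 (by assumption))
       simp only [PySem.Str.startswith] at hsw
       rw [pvStepA]
       simp only [hsw]
       rcases Decidable.em (a ∈ ["--runexp-slurm-verbatim", "--runexp-slurm-template",
           "--runexp-max-concurrent-sweep", "--runexp-job-out-dir"]) with hk | hk <;>
       rcases Decidable.em (a ∈ ["--runexp-slurm", "--runexp-no-dry-run"]) with hf | hf <;>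
       simp_all [pvKvB_iff, pvFlagB_iff] <;> tauto)
    | (have hsw := pvFlag_startswith a ((pvFlagB_iff a).1 (by assumption))
       simp only [PySem.Str.startswith] at hsw
       rw [pvStepA]
       simp only [hsw]
       rcases Decidable.em (a ∈ ["--runexp-slurm-verbatim", "--runexp-slurm-template",
           "--runexp-max-concurrent-sweep", "--runexp-job-out-dir"]) with hk | hk <;>
       rcases Decidable.em (a ∈ ["--runexp-slurm", "--runexp-no-dry-run"]) with hf | hf <;>
       simp_all [pvKvB_iff, pvFlagB_iff] <;> tauto)
    | (rw [pvStepA]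
       have hk : a ∉ ["--runexp-slurm-verbatim", "--runexp-slurm-template",
           "--runexp-max-concurrent-sweep", "--runexp-job-out-dir"] :=
         fun h => hkv ((pvKvB_iff a).2 h)
       have hf : a ∉ ["--runexp-slurm", "--runexp-no-dry-run"] :=
         fun h => hfl ((pvFlagB_iff a).2 h)
       by_cases hsw : PySem.Chars.startswith a.toList ['-', '-'] = true <;>
       simp_all)

theorem pv_mem_foldA (args : List String) :
    ∀ (acc : List Int) (s i : Int),
      (i ∈ (PySem.List.enumerate args s).foldl pvStepA acc) ↔
        (i ∈ acc ∨ pvBadB args s i = true) := by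
  induction args with
  | nil => intro acc s i; simp [PySem.List.enumerate_nil, pvBadB]
  | cons a rest ih =>
    intro acc s i
    rw [PySem.List.enumerate_cons, List.foldl_cons, ih, pv_mem_stepA]
    simp only [pvBadB, pvResv, Bool.or_eq_true, Bool.and_eq_true, beq_iff_eq]
    tauto

theorem pvBadB_lt (args : List String) : ∀ (s i : Int), i < s → pvBadB args s i = false := by
  induction args with
  | nil => intro s i _; rfl
  | cons a rest ih =>
    intro s i h
    simp only [pvBadB, Bool.or_eq_false_iff, Bool.and_eq_false_iff]
    refine ⟨⟨?_, ?_⟩, ih (s + 1) i (by omega)⟩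
    · left; simp; omega
    · left; simp; omega

theorem pvBadB_get (args : List String) :
    ∀ (s : Int) (j : Nat) (hj : j < args.length),
      pvBadB args s (s + (j : Int)) =
        ((if h : j = 0 then false else pvKvB (args[j - 1]'(by omega))) || pvResv (args[j]'hj)) := by
  induction args with
  | nil => intro _ j hj; simp at hj
  | cons a rest ih =>
    intro s j hj
    match j with
    | 0 =>
      have h3 : pvBadB rest (s + 1) s = false := pvBadB_lt rest (s + 1) s (by omega)
      have h2 : ((s == s + 1) : Bool) = false := beq_eq_false_iff_ne.2 (by omega)
      simp [pvBadB, h2, h3]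
    | 1 =>
      have h1 : ((s + 1 == s) : Bool) = false := beq_eq_false_iff_ne.2 (by omega)
      have h3 := ih (s + 1) 0 (by simpa using hj)
      simp only [Nat.cast_zero, add_zero, Nat.cast_one] at h3 ⊢
      simp [pvBadB, h1, h3]
    | (k + 2) =>
      have h3 := ih (s + 1) (k + 1) (by simpa using hj)
      simp only [pvBadB]
      push_cast
      push_cast at h3
      rw [show s + ((k : Int) + 2) = s + 1 + ((k : Int) + 1) from by ring]
      rw [h3]
      have h1 : ((s + 1 + ((k : Int) + 1) == s) : Bool) = false := beq_eq_false_iff_ne.2 (by omega)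
      have h2 : ((s + 1 + ((k : Int) + 1) == s + 1) : Bool) = false := beq_eq_false_iff_ne.2 (by omega)
      simp only [h1, h2]
      rfl

-- filter-over-enumerate with a pointwise-known predicate is the one-pass pvGo
theorem pv_filt_go (args : List String) :
    ∀ (Q : Int → Bool) (s : Int) (prev : Bool),
      (∀ (j : Nat) (hj : j < args.length),
        Q (s + (j : Int)) =
          (!((if h : j = 0 then prev else pvKvB (args[j - 1]'(by omega))) || pvResv (args[j]'hj)))) →
      ((PySem.List.enumerate args s).filter (fun p => Q p.1)).map (·.2) = pvGo prev args := by
  induction args with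
  | nil => intro Q s prev _; simp [PySem.List.enumerate_nil, pvGo]
  | cons a rest ih =>
    intro Q s prev hQ
    have h0 : Q s = (!(prev || pvResv a)) := by
      have := hQ 0 (by simp)
      simpa using this
    have htail :
        ((PySem.List.enumerate rest (s + 1)).filter (fun p => Q p.1)).map (·.2) =
          pvGo (pvKvB a) rest := by
      apply ih Q (s + 1) (pvKvB a)
      intro j hj
      have := hQ (j + 1) (by simpa using Nat.succ_lt_succ hj)
      have he : s + ((j + 1 : Nat) : Int) = (s + 1) + ((j : Nat) : Int) := by push_cast; ring
      rw [he] at this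
      rw [this]
      match j with
      | 0 => simp
      | (k + 1) => simp
    rw [PySem.List.enumerate_cons, List.filter_cons]
    cases hpr : (prev || pvResv a) with
    | false => simp [h0, hpr, pvGo, htail]
    | true => simp [h0, hpr, pvGo, htail]

-- B's foldl unrolled into pvGo
theorem pv_foldB (args : List String) :
    ∀ (acc : List String) (prev : Bool),
      ((args.foldl
        (fun (st : List String × Bool) arg =>
          (if ¬ (st.2 || PySem.Set.contains pvKvSet arg || PySem.Set.contains pvFlagSet arg)
           then st.1 ++ [arg] else st.1,
           PySem.Set.contains pvKvSet arg))
        (acc, prev)).1) = acc ++ pvGo prev args := by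
  induction args with
  | nil => intro acc prev; simp [pvGo]
  | cons a rest ih =>
    intro acc prev
    rw [List.foldl_cons]
    by_cases h : (prev || PySem.Set.contains pvKvSet a || PySem.Set.contains pvFlagSet a) = true
    · simp only [h]
      rw [ih]
      have ht : (prev || pvResv a) = true := by
        simpa [pvResv, pvKvB, pvFlagB, Bool.or_assoc] using h
      simp [pvGo, ht, pvKvB]
    · have hX : (prev || PySem.Set.contains pvKvSet a || PySem.Set.contains pvFlagSet a) = false :=
        Bool.eq_false_iff.2 h
      simp only [hX]
      rw [ih]
      have hf : (prev || pvResv a) = false := by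
        simpa [pvResv, pvKvB, pvFlagB, Bool.or_assoc] using hX
      simp [pvGo, hf, pvKvB, List.append_assoc]

-- ===== VERDICT (by name: the statement is the Claim_ definition above) =====
theorem remove_runexp_args_spec : Claim_equal_remove_runexp_args := by
  intro args _
  unfold Spec_remove_runexp_args remove_runexp_args remove_runexp_args_alt
  rw [pv_foldB args [] false, List.nil_append]
  show ((PySem.List.enumerate args 0).filter
      (fun p => decide (p.1 ∉ (PySem.List.enumerate args 0).foldl pvStepA []))).map (·.2)
    = pvGo false args
  refine pv_filt_go args
    (fun i => decide (i ∉ (PySem.List.enumerate args 0).foldl pvStepA [])) 0 false ?_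
  intro j hj
  have hmem : ∀ i : Int,
      (i ∈ (PySem.List.enumerate args 0).foldl pvStepA []) ↔ pvBadB args 0 i = true := by
    intro i; rw [pv_mem_foldA]; simp
  show (decide (((0 : Int) + (j : Int)) ∉ (PySem.List.enumerate args 0).foldl pvStepA []))
      = (!((if h : j = 0 then false else pvKvB (args[j - 1]'(by omega))) || pvResv (args[j]'hj)))
  rw [zero_add]
  have hQ : (decide (((j : Int)) ∉ (PySem.List.enumerate args 0).foldl pvStepA []))
      = (!(pvBadB args 0 ((j : Int)))) := by
    rcases hb : pvBadB args 0 ((j : Int)) with _ | _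
    · simp [hmem, hb]
    · simp [hmem, hb]
  rw [hQ]
  have hg := pvBadB_get args 0 j hj
  rw [zero_add] at hg
  rw [hg]
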